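-- pv_equiv track=rewrite | github.com/juliofariasdev/conhecimento | Computacao/PYTHON/guppe/exercícios/exercícios_secao7/exercício59.py | soma_das_colunas_impares
-- ===== SOURCE A (Python) =====
-- transpostador_de_matriz = lambda matriz: [[matriz[j][i] for j in range(len(matriz))]for i in range(len(matriz[0]))]
--
-- def soma_das_colunas_impares(matriz):
--     matriz_transposta = transpostador_de_matriz(matriz)
--     indice = 1
--     soma = 0
--     for coluna in matriz_transposta:
--         if indice%2:
--             soma = sum(coluna, soma)
--         indice +=1
--     return soma
-- ===== SOURCE B (Python) =====
-- def soma_das_colunas_impares(matriz):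
--     n_cols = len(matriz[0])
--     soma = 0
--     for i in range(0, n_cols, 2):
--         for linha in matriz:
--             soma += linha[i]
--     return soma
-- ===== Notes on version B (the rewrite author's own statement) =====
-- stated objective: simpler
-- what changed: B does not build the transpose: it sums matriz[row][i] directly for i in range(0, n_cols, 2), removing the intermediate transposed matrix (no allocation of rows*cols temporaries).
import Mathlib
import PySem

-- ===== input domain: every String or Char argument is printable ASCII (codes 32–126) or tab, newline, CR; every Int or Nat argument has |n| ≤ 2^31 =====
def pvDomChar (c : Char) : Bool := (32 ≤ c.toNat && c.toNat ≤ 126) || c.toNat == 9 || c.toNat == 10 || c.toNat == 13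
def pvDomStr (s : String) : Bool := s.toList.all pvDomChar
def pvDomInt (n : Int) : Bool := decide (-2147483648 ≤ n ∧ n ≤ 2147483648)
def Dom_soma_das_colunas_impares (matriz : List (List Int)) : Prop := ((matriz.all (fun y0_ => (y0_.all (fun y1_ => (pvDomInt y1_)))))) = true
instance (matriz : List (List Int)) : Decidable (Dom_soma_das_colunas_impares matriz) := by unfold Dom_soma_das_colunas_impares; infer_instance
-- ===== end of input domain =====

-- B sums matriz[row][i] directly for the odd 1-based columns (i = 0,2,4,…) instead of
-- building the transposed matrix first; same exact result, simpler code.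


-- ===== PORT A =====
def soma_das_colunas_impares (matriz : List (List Int)) : Int :=
  let matriz_transposta : List (List Int) :=
    (PySem.List.pyRange 0 ((matriz.headD []).length : Int) 1).map (fun i =>
      (PySem.List.pyRange 0 (matriz.length : Int) 1).map (fun j =>
        PySem.List.pyGetD (PySem.List.pyGetD matriz j []) i 0))
  (matriz_transposta.foldl
    (fun (p : Int × Int) coluna =>
      (if p.2 % 2 ≠ 0 then coluna.foldl (fun s x => s + x) p.1 else p.1, p.2 + 1))
    (0, 1)).1

-- ===== PORT B =====
def soma_das_colunas_impares_alt (matriz : List (List Int)) : Int :=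
  let n_cols : Int := ((matriz.headD []).length : Int)
  (PySem.List.pyRange 0 n_cols 2).foldl
    (fun soma i => matriz.foldl (fun s linha => s + PySem.List.pyGetD linha i 0) soma) 0

-- ===== PRECONDITION & SPEC =====
-- Pre_ excludes exactly the inputs where Python A raises: the empty matrix (len(matriz[0])
-- is an IndexError) and ragged matrices with a row shorter than the first row (the
-- transpose indexes every row up to len(matriz[0])-1).
def Pre_soma_das_colunas_impares (matriz : List (List Int)) : Prop :=
  matriz ≠ [] ∧ ∀ row ∈ matriz, (matriz.headD []).length ≤ row.length
instance (matriz : List (List Int)) : Decidable (Pre_soma_das_colunas_impares matriz) := by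
  unfold Pre_soma_das_colunas_impares; infer_instance
def pvWitness_soma_das_colunas_impares : List (List Int) := [[1, 2], [3, 4]]

def Spec_soma_das_colunas_impares (matriz : List (List Int)) (out : Int) : Prop :=
  out = soma_das_colunas_impares_alt matriz
instance (matriz : List (List Int)) (out : Int) : Decidable (Spec_soma_das_colunas_impares matriz out) := by
  unfold Spec_soma_das_colunas_impares; infer_instance

-- ===== CLAIM (what is proved, stated in full; the proofs are below) =====
def Claim_equal_soma_das_colunas_impares : Prop := ∀ (matriz : List (List Int)), Dom_soma_das_colunas_impares matriz → Pre_soma_das_colunas_impares matriz → Spec_soma_das_colunas_impares matriz (soma_das_colunas_impares matriz)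

-- ===== LEMMAS AND PROOFS =====

-- column sum of column i, reading missing entries as 0 (never hit inside Pre_)
def pvColSum (matriz : List (List Int)) (i : Int) : Int :=
  (matriz.map (fun row => PySem.List.pyGetD row i 0)).sum

-- B's nested folds are the sum of pvColSum over range(0, n_cols, 2)
theorem alt_eq_sum (matriz : List (List Int)) :
    soma_das_colunas_impares_alt matriz =
      ((PySem.List.pyRange 0 ((matriz.headD []).length : Int) 2).map (pvColSum matriz)).sum := by
  unfold soma_das_colunas_impares_alt
  have h1 : (fun (soma i : Int) => matriz.foldl (fun s linha => s + PySem.List.pyGetD linha i 0) soma)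
      = fun soma i => soma + pvColSum matriz i := by
    funext soma i
    exact PySem.List.foldl_add matriz (fun linha => PySem.List.pyGetD linha i 0) soma
  rw [h1, PySem.List.foldl_add _ (pvColSum matriz) 0, zero_add]

-- A's loop with its 1-based counter, over any column family colL
theorem lemA (colL : Int → List Int) (n : Nat) : ∀ (s k : Int),
    ((PySem.List.pyRange 0 (n : Int) 1).map colL).foldl
      (fun (p : Int × Int) coluna =>
        (if p.2 % 2 ≠ 0 then coluna.foldl (fun s x => s + x) p.1 else p.1, p.2 + 1)) (s, k)
    = (s + (((PySem.List.pyRange 0 (n : Int) 1).filter (fun j => decide ((k + j) % 2 ≠ 0))).map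
          (fun j => (colL j).sum)).sum, k + n) := by
  induction n with
  | zero =>
      intro s k
      simp [PySem.List.pyRange_one_eq_nil (by omega : (0:Int) ≤ 0)]
  | succ n ih =>
      intro s k
      have hc : ((n + 1 : Nat) : Int) = (n : Int) + 1 := by push_cast; ring
      rw [hc, PySem.List.pyRange_one_succ_right (by positivity : (0:Int) ≤ (n:Int))]
      rw [List.map_append, List.foldl_append, ih s k]
      rw [List.filter_append, List.map_append, List.sum_append]
      simp only [List.map_cons, List.map_nil, List.foldl_cons, List.foldl_nil, List.filter_cons,
        List.filter_nil]
      rw [Prod.mk.injEq]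
      by_cases hpar : (k + (n : Int)) % 2 = 0
      · rw [if_neg (by omega), if_neg (by simp [hpar])]
        exact ⟨by simp, by ring⟩
      · rw [if_pos hpar, if_pos (by simp [hpar])]
        refine ⟨?_, by ring⟩
        rw [PySem.List.foldl_add (colL (n : Int)) (fun x => x)]
        simp only [List.map_cons, List.map_nil, List.sum_cons, List.sum_nil]
        have hid : (List.map (fun x => x) (colL (n : Int))).sum = (colL (n : Int)).sum := by simp
        rw [hid]; ring

-- the transposed column i equals the direct column i
theorem col_eq (matriz : List (List Int)) (i : Int) :
    (PySem.List.pyRange 0 (matriz.length : Int) 1).map (fun j =>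
        PySem.List.pyGetD (PySem.List.pyGetD matriz j []) i 0)
    = matriz.map (fun row => PySem.List.pyGetD row i 0) := by
  have h : (fun j => PySem.List.pyGetD (PySem.List.pyGetD matriz j ([] : List Int)) i 0)
      = (fun row => PySem.List.pyGetD row i 0) ∘ (fun j => PySem.List.pyGetD matriz j []) := rfl
  rw [h, ← List.map_map, PySem.List.map_pyGetD_pyRange_zero' matriz ([] : List Int)]

-- range(0, n) filtered on (1+j) odd IS range(0, n, 2)
theorem filter_even (n : Nat) :
    (PySem.List.pyRange 0 (n : Int) 1).filter (fun j => decide ((1 + j) % 2 ≠ 0))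
    = PySem.List.pyRange 0 (n : Int) 2 := by
  have h2 : (0:Int) < 2 := by norm_num
  have pw1 : ((PySem.List.pyRange 0 (n : Int) 1).filter (fun j => decide ((1 + j) % 2 ≠ 0))).Pairwise (· < ·) :=
    (PySem.List.pairwise_lt_pyRange_one 0 (n : Int)).filter _
  have pw2 : (PySem.List.pyRange 0 (n : Int) 2).Pairwise (· < ·) := by
    rw [PySem.List.pyRange_of_pos 0 (n : Int) h2, List.pairwise_map]
    exact List.pairwise_lt_range.imp (fun h => by omega)
  have hmem : ∀ x : Int, (x ∈ (PySem.List.pyRange 0 (n : Int) 1).filter (fun j => decide ((1 + j) % 2 ≠ 0)))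
      ↔ x ∈ PySem.List.pyRange 0 (n : Int) 2 := by
    intro x
    rw [List.mem_filter, PySem.List.mem_pyRange_one, PySem.List.mem_pyRange_iff_of_pos h2]
    constructor
    · rintro ⟨⟨h0, hn⟩, hodd⟩
      have hodd' : (1 + x) % 2 ≠ 0 := by simpa using hodd
      exact ⟨h0, hn, by omega⟩
    · rintro ⟨h0, hn, hdvd⟩
      refine ⟨⟨h0, hn⟩, ?_⟩
      simp only [decide_eq_true_eq]
      omega
  have hperm : ((PySem.List.pyRange 0 (n : Int) 1).filter (fun j => decide ((1 + j) % 2 ≠ 0))).Perm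
      (PySem.List.pyRange 0 (n : Int) 2) := by
    rw [List.perm_ext_iff_of_nodup (pw1.imp (fun h => ne_of_lt h)) (pw2.imp (fun h => ne_of_lt h))]
    exact hmem
  exact hperm.eq_of_pairwise (fun a b _ _ h1 h2 => by omega) pw1 pw2

-- ===== VERDICT (by name: the statement is the Claim_ definition above) =====
theorem soma_das_colunas_impares_spec : Claim_equal_soma_das_colunas_impares := by
  intro matriz _ _
  unfold Spec_soma_das_colunas_impares
  unfold soma_das_colunas_impares
  dsimp only
  rw [lemA, alt_eq_sum]
  simp only [zero_add]
  congr 1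
  rw [filter_even]
  refine List.map_congr_left (fun j hj => ?_)
  unfold pvColSum
  rw [col_eq]
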